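-- pv_equiv track=rewrite | github.com/RVRes/Leetcode_problems | coins_heads_or_tails.py | solution
-- ===== SOURCE A (Python) =====
-- def solution(A):
--     '''returns minimum number of coins 0, 1 to reverse'''
--     count_from_one = 0
--     count_from_zero = 0
--     for i in range(0, len(A), 2):
--         count_from_one += 1 - A[i]
--         count_from_zero += A[i]
--     for i in range(1, len(A), 2):
--         count_from_one += A[i]
--         count_from_zero += 1 - A[i]
--     return min(count_from_one, count_from_zero)
-- ===== SOURCE B (Python) =====
-- def solution(A):
--     '''returns minimum number of coins 0, 1 to reverse'''
--     count = 0
--     for i, a in enumerate(A):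
--         if i % 2 == 0:
--             count += 1 - a
--         else:
--             count += a
--     return min(count, len(A) - count)
-- ===== Notes on version B (the rewrite author's own statement) =====
-- stated objective: simpler
-- what changed: Replaces A's two stride-2 index loops maintaining two counters by a single enumerate pass maintaining one counter, using the identity that the two pattern-mismatch counts sum to len(A), so the complement is len(A) - count.
import Mathlib
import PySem

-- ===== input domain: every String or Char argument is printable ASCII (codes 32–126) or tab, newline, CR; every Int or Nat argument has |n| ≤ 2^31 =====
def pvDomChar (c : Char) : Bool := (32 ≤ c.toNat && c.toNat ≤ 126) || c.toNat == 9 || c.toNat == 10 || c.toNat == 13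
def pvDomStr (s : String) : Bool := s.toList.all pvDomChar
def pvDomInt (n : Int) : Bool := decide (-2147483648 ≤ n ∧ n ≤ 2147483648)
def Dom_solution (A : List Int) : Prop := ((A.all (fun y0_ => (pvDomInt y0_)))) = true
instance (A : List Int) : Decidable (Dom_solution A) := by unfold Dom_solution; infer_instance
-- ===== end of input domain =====

-- B replaces A's two stride-2 index loops with two counters by a single enumerate pass
-- with one counter, returning min(count, len(A) - count) (simpler decomposition, same cost).

-- ===== PORT A =====
def solution (A : List Int) : Int :=
  -- count_from_one, count_from_zero accumulated as a pair through the two stride-2 loops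
  let s1 : Int × Int := (PySem.List.pyRange 0 (A.length : Int) 2).foldl
    (fun p i => (p.1 + (1 - PySem.List.pyGetD A i 0), p.2 + PySem.List.pyGetD A i 0)) (0, 0)
  let s2 : Int × Int := (PySem.List.pyRange 1 (A.length : Int) 2).foldl
    (fun p i => (p.1 + PySem.List.pyGetD A i 0, p.2 + (1 - PySem.List.pyGetD A i 0))) s1
  min s2.1 s2.2

-- ===== PORT B =====
def solution_alt (A : List Int) : Int :=
  let count : Int := (PySem.List.enumerate A 0).foldl
    (fun c p => if PySem.Int.mod p.1 2 = 0 then c + (1 - p.2) else c + p.2) 0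
  min count ((A.length : Int) - count)

-- ===== PRECONDITION & SPEC =====
def Spec_solution (A : List Int) (out : Int) : Prop := out = solution_alt A
instance (A : List Int) (out : Int) : Decidable (Spec_solution A out) := by unfold Spec_solution; infer_instance

-- ===== CLAIM (what is proved, stated in full; the proofs are below) =====
def Claim_equal_solution : Prop := ∀ (A : List Int), Dom_solution A → Spec_solution A (solution A)

-- ===== LEMMAS AND PROOFS =====

-- elements of A at even (b = true) resp. odd (b = false) positions
def pvSel (b : Bool) : List Int → List Int
  | [] => []
  | a :: t => if b then a :: pvSel false t else pvSel true t

-- B's counter started at even (b = true) or odd (b = false) parity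
def pvCnt (b : Bool) : List Int → Int
  | [] => 0
  | a :: t => (if b then 1 - a else a) + pvCnt (!b) t

lemma pvSel_length (A : List Int) :
    (pvSel true A).length + (pvSel false A).length = A.length := by
  induction A with
  | nil => simp [pvSel]
  | cons a t ih => simp [pvSel] at *; omega

-- pyRange 0 n 2 as a Nat range
lemma pvRange0 (L : Nat) :
    PySem.List.pyRange 0 (L : Int) 2 =
      (List.range ((L + 1) / 2)).map (fun k : Nat => 2 * (k : Int)) := by
  rw [PySem.List.pyRange_of_pos _ _ (by norm_num)]
  by_cases h : (0 : Int) < (L : Int)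
  · rw [if_pos h]
    have hN : (((L : Int) - 0 + 2 - 1) / 2).toNat = (L + 1) / 2 := by omega
    rw [hN]
    apply List.map_congr_left; intro k _; ring
  · have hL : L = 0 := by omega
    subst hL; simp

-- pyRange 1 n 2 as a Nat range
lemma pvRange1 (L : Nat) :
    PySem.List.pyRange 1 (L : Int) 2 =
      (List.range (L / 2)).map (fun k : Nat => 2 * (k : Int) + 1) := by
  rw [PySem.List.pyRange_of_pos _ _ (by norm_num)]
  by_cases h : (1 : Int) < (L : Int)
  · rw [if_pos h]
    have hN : (((L : Int) - 1 + 2 - 1) / 2).toNat = L / 2 := by omega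
    rw [hN]
    apply List.map_congr_left; intro k _; ring
  · rw [if_neg h]
    have hL : L ≤ 1 := by omega
    interval_cases L <;> simp
lemma pvGet_even (A : List Int) (k : Nat) :
    PySem.List.pyGetD A (2 * (k : Int)) 0 = A.getD (2 * k) 0 := by
  have : (2 * (k : Int)) = ((2 * k : Nat) : Int) := by push_cast; ring
  rw [this, PySem.List.pyGetD_natCast]

lemma pvGet_odd (A : List Int) (k : Nat) :
    PySem.List.pyGetD A (2 * (k : Int) + 1) 0 = A.getD (2 * k + 1) 0 := by
  have : (2 * (k : Int) + 1) = ((2 * k + 1 : Nat) : Int) := by push_cast; ring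
  rw [this, PySem.List.pyGetD_natCast]

-- the even/odd Nat ranges pick out exactly the even/odd-position elements
lemma pvEO (A : List Int) :
    (List.range ((A.length + 1) / 2)).map (fun k => A.getD (2 * k) 0) = pvSel true A ∧
    (List.range (A.length / 2)).map (fun k => A.getD (2 * k + 1) 0) = pvSel false A := by
  induction A with
  | nil => simp [pvSel]
  | cons a t ih =>
    obtain ⟨ih1, ih2⟩ := ih
    constructor
    · have hlen : (t.length + 1 + 1) / 2 = t.length / 2 + 1 := by omega
      rw [List.length_cons, hlen, List.range_succ_eq_map, List.map_cons, List.map_map]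
      have htail : (List.range (t.length / 2)).map
          ((fun k => (a :: t).getD (2 * k) 0) ∘ (fun i => i + 1)) = pvSel false t := by
        rw [← ih2]
        apply List.map_congr_left; intro k _
        simp [show 2 * (k + 1) = (2 * k + 1) + 1 by ring]
      simp only [Function.comp_def] at htail ⊢
      rw [htail]
      simp [pvSel]
    · show _ = pvSel true t
      rw [List.length_cons, ← ih1]
      apply List.map_congr_left; intro k _
      simp

-- the additive pair fold over a plain list, in closed form
lemma pvFold1 (l : List Int) (init : Int × Int) :
    l.foldl (fun p x => (p.1 + (1 - x), p.2 + x)) init =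
      (init.1 + ((l.length : Int) - l.sum), init.2 + l.sum) := by
  induction l generalizing init with
  | nil => simp
  | cons a t ih =>
    simp only [List.foldl_cons, ih, List.length_cons, List.sum_cons]
    refine Prod.ext ?_ ?_ <;> (simp; ring)

lemma pvFold2 (l : List Int) (init : Int × Int) :
    l.foldl (fun p x => (p.1 + x, p.2 + (1 - x))) init =
      (init.1 + l.sum, init.2 + ((l.length : Int) - l.sum)) := by
  induction l generalizing init with
  | nil => simp
  | cons a t ih =>
    simp only [List.foldl_cons, ih, List.length_cons, List.sum_cons]
    refine Prod.ext ?_ ?_ <;> (simp; ring)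

-- B's fold over enumerate, in terms of pvCnt
lemma pvEnumFold (A : List Int) (s c : Int) (hs : 0 ≤ s) :
    (PySem.List.enumerate A s).foldl
        (fun c p => if PySem.Int.mod p.1 2 = 0 then c + (1 - p.2) else c + p.2) c =
      c + pvCnt (decide (s % 2 = 0)) A := by
  induction A generalizing s c with
  | nil => simp [PySem.List.enumerate, pvCnt]
  | cons a t ih =>
    rw [PySem.List.enumerate_cons, List.foldl_cons, ih (s + 1) _ (by omega)]
    rcases Int.emod_two_eq_zero_or_one s with h | h
    · have h1 : (s + 1) % 2 = 1 := by omega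
      simp [h, h1, pvCnt]; ring
    · have h1 : (s + 1) % 2 = 0 := by omega
      simp [h, h1, pvCnt]; ring

-- pvCnt in terms of the even/odd-position sublists
lemma pvCnt_eq (A : List Int) :
    pvCnt true A = ((pvSel true A).length : Int) - (pvSel true A).sum + (pvSel false A).sum ∧
    pvCnt false A = (pvSel true A).sum + ((pvSel false A).length : Int) - (pvSel false A).sum := by
  induction A with
  | nil => simp [pvCnt, pvSel]
  | cons a t ih =>
    obtain ⟨ih1, ih2⟩ := ih
    constructor
    · simp only [pvCnt, pvSel, Bool.not_true, if_pos, ih2]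
      simp; ring
    · simp only [pvCnt, pvSel, Bool.not_false, ih1]
      simp; ring

-- ===== VERDICT (by name: the statement is the Claim_ definition above) =====
theorem solution_spec : Claim_equal_solution := by
  intro A _
  unfold Spec_solution solution solution_alt
  dsimp only
  obtain ⟨hE, hO⟩ := pvEO A
  have hget0 : (List.range ((A.length + 1) / 2)).map
      (fun k : Nat => PySem.List.pyGetD A (2 * (k : Int)) 0) = pvSel true A := by
    rw [← hE]; apply List.map_congr_left; intro k _; exact pvGet_even A k
  have hget1 : (List.range (A.length / 2)).map
      (fun k : Nat => PySem.List.pyGetD A (2 * (k : Int) + 1) 0) = pvSel false A := by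
    rw [← hO]; apply List.map_congr_left; intro k _; exact pvGet_odd A k
  -- A's first fold, over the even positions
  have e1 := pvFold1 (pvSel true A) (0, 0)
  conv at e1 => lhs; rw [← hget0, List.foldl_map]
  -- A's second fold, over the odd positions
  have e2 := pvFold2 (pvSel false A)
      (((0, 0) : Int × Int).1 + (((pvSel true A).length : Int) - (pvSel true A).sum),
       ((0, 0) : Int × Int).2 + (pvSel true A).sum)
  conv at e2 => lhs; rw [← hget1, List.foldl_map]
  rw [pvRange0, pvRange1, List.foldl_map, List.foldl_map, e1, e2]
  -- B's fold
  rw [pvEnumFold A 0 0 (by norm_num)]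
  obtain ⟨hc1, _⟩ := pvCnt_eq A
  have hlen := pvSel_length A
  have hlen' : ((pvSel true A).length : Int) + ((pvSel false A).length : Int)
      = (A.length : Int) := by push_cast [← hlen]; ring
  norm_num [hc1]
  congr 1
  omega
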